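-- pv_equiv track=rewrite | github.com/wazuh/wazuh | framework/wazuh/core/utils.py | get_fields_to_nest
-- ===== SOURCE A (Python) =====
-- import operator
-- from itertools import groupby, chain
--
-- def get_fields_to_nest(fields, force_fields=[], split_character="_"):
--     nest = {k: set(filter(lambda x: x != k, chain.from_iterable(g)))
--             for k, g in groupby(map(lambda x: x.split(split_character), sorted(fields)),
--                                 key=lambda x: x[0])}
--     nested = filter(lambda x: len(x[1]) > 1 or x[0] in force_fields, nest.items())
--     nested = [(field, {(subfield, split_character.join([field, subfield])) for subfield in subfields}) for
--               field, subfields in nested]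
--     non_nested = set(filter(lambda x: x.split(split_character)[0] not in map(operator.itemgetter(0), nested), fields))
--     return nested, non_nested
-- ===== SOURCE B (Python) =====
-- def get_fields_to_nest(fields, force_fields=[], split_character="_"):
--     # No groupby and no dict of sets: list the distinct prefixes in order of first
--     # appearance over the sorted fields, then gather each prefix's subfields by a
--     # direct comprehension over the sorted fields (one scan per prefix).
--     srt = sorted(fields)
--     prefixes = []
--     for f in srt:
--         p = f.split(split_character)[0]
--         if p not in prefixes:
--             prefixes.append(p)
--     nested = []
--     for p in prefixes:
--         subs = {t
--                 for f in srt if f.split(split_character)[0] == p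
--                 for t in f.split(split_character) if t != p}
--         if len(subs) > 1 or p in force_fields:
--             nested.append((p, {(s, p + split_character + s) for s in subs}))
--     seen = {q for q, _ in nested}
--     non_nested = {f for f in fields if f.split(split_character)[0] not in seen}
--     return nested, non_nested
-- ===== Notes on version B (the rewrite author's own statement) =====
-- stated objective: alternative
-- what changed: B has no grouping pass and no dict of sets: it collects the distinct prefixes in first-appearance order over the sorted fields, then builds each prefix's subfield set by a direct rescan of the sorted fields (one comprehension per prefix), instead of A's map/groupby/dict-comprehension pipeline.
import Mathlib
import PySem

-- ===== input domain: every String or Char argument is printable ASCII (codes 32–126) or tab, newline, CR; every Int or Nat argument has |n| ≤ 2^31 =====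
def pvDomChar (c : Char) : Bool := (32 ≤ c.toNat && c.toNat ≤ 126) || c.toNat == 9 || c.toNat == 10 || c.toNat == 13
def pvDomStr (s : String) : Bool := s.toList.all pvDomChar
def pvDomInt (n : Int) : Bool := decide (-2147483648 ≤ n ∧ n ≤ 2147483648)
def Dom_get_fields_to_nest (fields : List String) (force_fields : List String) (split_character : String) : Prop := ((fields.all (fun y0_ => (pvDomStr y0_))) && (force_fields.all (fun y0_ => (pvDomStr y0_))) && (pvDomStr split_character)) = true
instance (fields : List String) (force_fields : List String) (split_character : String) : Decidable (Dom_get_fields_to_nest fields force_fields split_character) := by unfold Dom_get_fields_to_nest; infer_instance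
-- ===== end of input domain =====

-- B drops A's groupby/dict-of-sets machinery entirely: it lists the distinct prefixes in
-- order of first appearance over the sorted fields, then gathers each prefix's subfields by
-- a direct rescan of the sorted fields, one scan per prefix (objective: alternative).

-- ===== PORT A =====
-- x.split(sep): Python raises ValueError for sep = "" — those inputs are outside Pre_ (default [] never reached inside Pre_)
def pvSplit (s sep : String) : List String := (PySem.Str.split? s sep).getD []

-- itertools.groupby(..., key=lambda x: x[0]) on the mapped token lists (split never returns [], so x[0] = headD)
def pvGroups : List (List String) → List (String × List (List String))
  | [] => []
  | t :: ts =>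
    (t.headD "", t :: ts.takeWhile (fun u => u.headD "" == t.headD "")) ::
      pvGroups (ts.dropWhile (fun u => u.headD "" == t.headD ""))
  termination_by l => l.length
  decreasing_by
    simp only [List.length_cons]
    exact Nat.lt_succ_of_le (List.dropWhile_sublist _).length_le

-- one entry of the dict comprehension: k ↦ set(filter(lambda x: x != k, chain.from_iterable(g)))
def pvStepA (d : PySem.Dict String (PySem.Set String)) (kg : String × List (List String)) :
    PySem.Dict String (PySem.Set String) :=
  d.insert kg.1 (PySem.Set.ofList ((kg.2.flatten).filter (fun x => !(x == kg.1))))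

def get_fields_to_nest (fields : List String) (force_fields : List String) (split_character : String) :
    (List (String × (List (String × String)))) × List String :=
  let nest := (pvGroups ((PySem.List.sorted fields (fun x => x)).map
      (fun x => pvSplit x split_character))).foldl pvStepA PySem.Dict.empty
  let nested := (nest.items.filter
      (fun kv => decide (1 < PySem.Set.len kv.2) || force_fields.contains kv.1)).map
      (fun kv => (kv.1, PySem.Set.ofList (kv.2.map
        (fun sub => (sub, PySem.Str.join split_character [kv.1, sub])))))
  let non_nested := PySem.Set.ofList (fields.filter
      (fun x => !((nested.map Prod.fst).contains ((pvSplit x split_character).headD ""))))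
  (nested, non_nested)

-- ===== PORT B =====
-- body of Source B's first loop: append the prefix of `f` to `acc` when not yet present
def pvStepP (sep : String) (acc : List String) (f : String) : List String :=
  let p := (pvSplit f sep).headD ""
  if acc.contains p then acc else acc ++ [p]

def get_fields_to_nest_alt (fields : List String) (force_fields : List String) (split_character : String) :
    (List (String × (List (String × String)))) × List String :=
  let srt := PySem.List.sorted fields (fun x => x)
  let prefixes := srt.foldl (pvStepP split_character) []
  let nested := prefixes.filterMap (fun p =>
    let subs := PySem.Set.ofList
      ((srt.filter (fun f => (pvSplit f split_character).headD "" == p)).flatMap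
        (fun f => (pvSplit f split_character).filter (fun t => !(t == p))))
    if decide (1 < subs.length) || force_fields.contains p
      then some (p, PySem.Set.ofList (subs.map (fun s => (s, p ++ split_character ++ s))))
      else none)
  let seen := PySem.Set.ofList (nested.map Prod.fst)
  let non_nested := PySem.Set.ofList (fields.filter
      (fun f => !(seen.contains ((pvSplit f split_character).headD ""))))
  (nested, non_nested)

-- ===== PRECONDITION & SPEC =====
-- Pre_ excludes only split_character = "" with a non-empty fields list, on which Python's
-- str.split raises ValueError (with fields = [] nothing is ever split and A returns normally).
def Pre_get_fields_to_nest (fields : List String) (force_fields : List String) (split_character : String) : Prop :=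
  split_character ≠ "" ∨ fields = []
instance (fields : List String) (force_fields : List String) (split_character : String) : Decidable (Pre_get_fields_to_nest fields force_fields split_character) := by unfold Pre_get_fields_to_nest; infer_instance

def pvWitness_get_fields_to_nest : List String × List String × String := (["a_b", "a_c", "d"], ["d"], "_")

def Spec_get_fields_to_nest (fields : List String) (force_fields : List String) (split_character : String) (out : (List (String × (List (String × String)))) × List String) : Prop := out = get_fields_to_nest_alt fields force_fields split_character
instance (fields : List String) (force_fields : List String) (split_character : String) (out : (List (String × (List (String × String)))) × List String) : Decidable (Spec_get_fields_to_nest fields force_fields split_character out) := by unfold Spec_get_fields_to_nest; infer_instance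

-- ===== CLAIM (what is proved, stated in full; the proofs are below) =====
def Claim_equal_get_fields_to_nest : Prop := ∀ (fields : List String) (force_fields : List String) (split_character : String), Dom_get_fields_to_nest fields force_fields split_character → Pre_get_fields_to_nest fields force_fields split_character → Spec_get_fields_to_nest fields force_fields split_character (get_fields_to_nest fields force_fields split_character)

-- ===== LEMMAS AND PROOFS =====

-- ---- generic list lemmas ----
theorem pv_filterMap_eq {α β : Type} (p : α → Bool) (f : α → β) (l : List α) :
    (l.filter p).map f = l.filterMap (fun x => if p x then some (f x) else none) := by
  induction l with
  | nil => rfl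
  | cons a l ih => by_cases h : p a <;> simp [h, ih]

theorem pv_set_update_append (s : PySem.Set String) (a b : List String) :
    PySem.Set.update s (a ++ b) = PySem.Set.update (PySem.Set.update s a) b := by
  simp [PySem.Set.update, List.foldl_append]

theorem pv_join2 (sep a b : String) : PySem.Str.join sep [a, b] = a ++ sep ++ b := by
  simp [PySem.Str.join, PySem.Chars.join, List.intercalate, String.append_assoc]

theorem pv_contains_ofList (l : List String) (x : String) :
    (PySem.Set.ofList l).contains x = l.contains x := by
  simp [PySem.Set.mem_ofList]

-- ---- first piece of a split (the text before the first occurrence of sep) ----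
def pvFirstPiece : List Char → List Char → List Char
  | [], _ => []
  | c :: rest, sep => if sep.isPrefixOf (c :: rest) then [] else c :: pvFirstPiece rest sep

theorem pvFP_cases (l sep : List Char) :
    pvFirstPiece l sep = l ∨ (pvFirstPiece l sep) ++ sep <+: l := by
  induction l with
  | nil => left; rfl
  | cons c rest ih =>
    by_cases hp : sep.isPrefixOf (c :: rest)
    · right
      simp only [pvFirstPiece, hp, if_pos, List.nil_append]
      exact List.isPrefixOf_iff_prefix.mp hp
    · simp only [pvFirstPiece, hp, if_neg, Bool.false_eq_true, not_false_iff]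
      rcases ih with h | h
      · left; rw [h]
      · right
        rw [List.cons_append]
        exact (List.cons_prefix_cons).mpr ⟨rfl, h⟩

theorem pvFP_first (l sep : List Char) :
    ∀ i < (pvFirstPiece l sep).length, ¬ sep <+: l.drop i := by
  induction l with
  | nil => intro i hi; simp [pvFirstPiece] at hi
  | cons c rest ih =>
    by_cases hp : sep.isPrefixOf (c :: rest)
    · intro i hi; simp [pvFirstPiece, hp] at hi
    · intro i hi
      simp only [pvFirstPiece, hp, if_neg, Bool.false_eq_true, not_false_iff,
        List.length_cons] at hi
      cases i with
      | zero =>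
        simpa [List.isPrefixOf_iff_prefix] using hp
      | succ n =>
        rw [List.drop_succ_cons]
        exact ih n (by omega)

theorem pvFP_noOcc (l sep : List Char) (hsep : sep ≠ [])
    (h : pvFirstPiece l sep = l) : ∀ i, ¬ sep <+: l.drop i := by
  intro i
  by_cases hi : i < l.length
  · exact pvFP_first l sep i (by rw [h]; exact hi)
  · rw [List.drop_eq_nil_of_le (by omega)]
    intro hpre
    exact hsep (List.prefix_nil.mp hpre)

theorem pvFP_determined (p sep : List Char) (hsep : sep ≠ []) :
    ∀ b : List Char, p ++ sep <+: b → (∀ i < p.length, ¬ sep <+: b.drop i) →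
    pvFirstPiece b sep = p := by
  induction p with
  | nil =>
    intro b hpre _
    rw [List.nil_append] at hpre
    cases b with
    | nil => exact absurd (List.prefix_nil.mp hpre) hsep
    | cons c bs =>
      simp only [pvFirstPiece, List.isPrefixOf_iff_prefix.mpr hpre, if_pos]
  | cons c p' ih =>
    intro b hpre hno
    cases b with
    | nil =>
      rw [List.cons_append] at hpre
      exact absurd (List.prefix_nil.mp hpre) (by simp)
    | cons d bs =>
      rw [List.cons_append, List.cons_prefix_cons] at hpre
      obtain ⟨rfl, hpre'⟩ := hpre
      have h0 : ¬ sep <+: (c :: bs) := by simpa using hno 0 (by simp)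
      have hp : sep.isPrefixOf (c :: bs) = false := by
        rw [← Bool.not_eq_true, List.isPrefixOf_iff_prefix]; exact h0
      simp only [pvFirstPiece, hp, if_neg, Bool.false_eq_true, not_false_iff]
      refine congrArg (c :: ·) (ih bs hpre' ?_)
      intro i hi
      have := hno (i + 1) (by simp; omega)
      rwa [List.drop_succ_cons] at this

theorem pvFP_transfer (a b p sep : List Char) (hsep : sep ≠ [])
    (hfp : pvFirstPiece a sep = p) (ha : p ++ sep <+: a) (hb : p ++ sep <+: b) :
    ∀ i < p.length, ¬ sep <+: b.drop i := by
  intro i hi hocc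
  obtain ⟨ta, hta⟩ := ha
  obtain ⟨tb, htb⟩ := hb
  have hiq : i ≤ (p ++ sep).length := by simp; omega
  have hq : sep <+: (p ++ sep).drop i := by
    rw [← htb, List.drop_append_of_le_length hiq] at hocc
    rw [List.prefix_iff_eq_take] at hocc ⊢
    rwa [List.take_append_of_le_length (by simp [List.length_drop]; omega)] at hocc
  have hocca : sep <+: a.drop i := by
    rw [← hta, List.drop_append_of_le_length hiq]
    exact hq.trans (List.prefix_append _ _)
  exact pvFP_first a sep i (by rw [hfp]; omega) hocca

-- ---- splitOn in terms of pvFirstPiece ----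
theorem pvGO_head (sep : List Char) (hsep : sep ≠ []) :
    ∀ (fuel : Nat) (l cur : List Char) (accs : List (List Char)), l.length < fuel →
    ∃ tl, PySem.Chars.splitOn.go sep fuel l cur accs =
      accs.reverse ++ (cur.reverse ++ pvFirstPiece l sep) :: tl := by
  intro fuel
  induction fuel with
  | zero => intro l cur accs h; omega
  | succ f ih =>
    intro l cur accs hlt
    cases l with
    | nil =>
      refine ⟨[], ?_⟩
      simp [PySem.Chars.splitOn.go, pvFirstPiece]
    | cons c rest =>
      by_cases hp : sep.isPrefixOf (c :: rest)
      · have hlen : ((c :: rest).drop sep.length).length < f := by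
          have : 0 < sep.length := List.length_pos_of_ne_nil hsep
          simp only [List.length_drop, List.length_cons] at *
          omega
        obtain ⟨tl, htl⟩ := ih ((c :: rest).drop sep.length) [] (cur.reverse :: accs) hlen
        refine ⟨pvFirstPiece ((c :: rest).drop sep.length) sep :: tl, ?_⟩
        rw [PySem.Chars.splitOn.go]
        simp only [hp, if_pos]
        rw [htl]
        simp [pvFirstPiece, hp]
      · obtain ⟨tl, htl⟩ := ih rest (c :: cur) accs (by simp at hlt ⊢; omega)
        refine ⟨tl, ?_⟩
        rw [PySem.Chars.splitOn.go]
        simp only [hp, Bool.false_eq_true, if_neg, not_false_iff]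
        rw [htl]
        simp [pvFirstPiece, hp]

theorem pvGO_single (sep : List Char) (hsep : sep ≠ []) :
    ∀ (l : List Char), (∀ i, ¬ sep <+: l.drop i) →
    ∀ (fuel : Nat) (cur : List Char) (accs : List (List Char)), l.length < fuel →
    PySem.Chars.splitOn.go sep fuel l cur accs = accs.reverse ++ [cur.reverse ++ l] := by
  intro l
  induction l with
  | nil =>
    intro _ fuel cur accs hlt
    cases fuel with
    | zero => omega
    | succ f => simp [PySem.Chars.splitOn.go]
  | cons c rest ih =>
    intro hno fuel cur accs hlt
    cases fuel with
    | zero => omega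
    | succ f =>
      have h0 : ¬ sep <+: (c :: rest) := by simpa using hno 0
      have hp : sep.isPrefixOf (c :: rest) = false := by
        rw [← Bool.not_eq_true, List.isPrefixOf_iff_prefix]; exact h0
      rw [PySem.Chars.splitOn.go]
      simp only [hp, Bool.false_eq_true, if_neg, not_false_iff]
      rw [ih (fun i => by simpa [List.drop_succ_cons] using hno (i + 1)) f (c :: cur) accs
        (by simp at hlt ⊢; omega)]
      simp

theorem pv_splitOn_cons (l sep : List Char) (hsep : sep ≠ []) :
    ∃ tl, PySem.Chars.splitOn l sep = pvFirstPiece l sep :: tl := by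
  obtain ⟨tl, htl⟩ := pvGO_head sep hsep (l.length + 1) l [] [] (by omega)
  exact ⟨tl, by simpa [PySem.Chars.splitOn] using htl⟩

theorem pv_splitOn_single (l sep : List Char) (hsep : sep ≠ [])
    (h : pvFirstPiece l sep = l) : PySem.Chars.splitOn l sep = [l] := by
  have := pvGO_single sep hsep l (pvFP_noOcc l sep hsep h) (l.length + 1) [] [] (by omega)
  simpa [PySem.Chars.splitOn] using this

theorem pv_toList_ne_nil (s : String) (h : s ≠ "") : s.toList ≠ [] := by
  simp [h]

theorem pvSplit_eq (f sep : String) (hsep : sep ≠ "") :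
    pvSplit f sep = (PySem.Chars.splitOn f.toList sep.toList).map String.ofList := by
  have h : sep.toList.isEmpty = false := by
    simpa [List.isEmpty_iff] using pv_toList_ne_nil sep hsep
  simp [pvSplit, PySem.Str.split?, PySem.Chars.split?, h]

theorem pvKey_eq (f sep : String) (hsep : sep ≠ "") :
    (pvSplit f sep).headD "" = String.ofList (pvFirstPiece f.toList sep.toList) := by
  rw [pvSplit_eq f sep hsep]
  obtain ⟨tl, htl⟩ := pv_splitOn_cons f.toList sep.toList (pv_toList_ne_nil sep hsep)
  rw [htl]
  rfl

-- ---- lexicographic facts on List Char ----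
theorem pv_lex_append_pos (xs : List Char) (c : Char) (ys : List Char) : xs < xs ++ c :: ys := by
  induction xs with
  | nil => exact List.nil_lt_cons c ys
  | cons x xs ih =>
    rw [List.cons_append, List.cons_lt_cons_iff]
    exact Or.inr ⟨rfl, ih⟩

theorem pv_str_le (s t : String) : s ≤ t ↔ List.instLE.le s.toList t.toList := by
  rw [String.le_iff_toList_le]
  unfold List.LE' List.instLE
  simp [List.le]

theorem pv_lex_between (q : List Char) : ∀ (F G H : List Char),
    q <+: F → q <+: H → List.instLE.le F G → List.instLE.le G H → q <+: G := by
  induction q with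
  | nil => intro F G H _ _ _ _; exact List.nil_prefix
  | cons c q' ih =>
    intro F G H hF hH hFG hGH
    cases F with
    | nil => exact absurd (List.prefix_nil.mp hF) (by simp)
    | cons a F' =>
      cases H with
      | nil => exact absurd (List.prefix_nil.mp hH) (by simp)
      | cons b H' =>
        rw [List.cons_prefix_cons] at hF hH
        obtain ⟨rfl, hF'⟩ := hF
        obtain ⟨rfl, hH'⟩ := hH
        cases G with
        | nil => exact absurd (List.nil_lt_cons _ _) hFG
        | cons d G' =>
          rw [List.cons_le_cons_iff] at hFG hGH
          rcases hFG with h1 | ⟨rfl, hFG'⟩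
          · rcases hGH with h2 | ⟨rfl, _⟩
            · exact absurd (h1.trans h2) (lt_irrefl _)
            · exact absurd h1 (lt_irrefl _)
          · rcases hGH with h2 | ⟨_, hGH'⟩
            · exact absurd h2 (lt_irrefl _)
            · exact List.cons_prefix_cons.mpr ⟨rfl, ih F' G' H' hF' hH' hFG' hGH'⟩

-- ---- the separation property of sorted fields ----
def pvSepIdx (ts : List (List String)) : Prop :=
  ∀ i m j (hi : i < ts.length) (hm : m < ts.length) (hj : j < ts.length),
    i < m → m < j →
    ts[i].headD "" = ts[j].headD "" → ts[m].headD "" ≠ ts[i].headD "" →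
    ts[i].filter (fun x => !(x == ts[i].headD "")) = []

theorem pv_S_main (sep f g h : String) (hsep : sep ≠ "")
    (hfg : f ≤ g) (hgh : g ≤ h)
    (hkey : (pvSplit f sep).headD "" = (pvSplit h sep).headD "")
    (hmid : (pvSplit g sep).headD "" ≠ (pvSplit f sep).headD "") :
    (pvSplit f sep).filter (fun x => !(x == (pvSplit f sep).headD "")) = [] := by
  have hS : sep.toList ≠ [] := pv_toList_ne_nil sep hsep
  rcases pvFP_cases f.toList sep.toList with hfp | hfp
  · -- no occurrence of sep in f: f splits as [f] and its own head, filter is empty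
    have : pvSplit f sep = [f] := by
      rw [pvSplit_eq f sep hsep, pv_splitOn_single f.toList sep.toList hS hfp]
      simp
    rw [this]
    simp
  · -- sep occurs in f, so (head f) ++ sep is a prefix of f; derive a contradiction
    exfalso
    have hkf := pvKey_eq f sep hsep
    have hkh := pvKey_eq h sep hsep
    have hPQ : pvFirstPiece f.toList sep.toList = pvFirstPiece h.toList sep.toList := by
      have := hkf.symm.trans (hkey.trans hkh)
      have := congrArg String.toList this
      simpa using this
    rcases pvFP_cases h.toList sep.toList with hhp | hhp
    · -- no sep in h: h itself is the shared head, but f = h ++ sep ++ … > h, yet f ≤ h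
      rw [hPQ, hhp] at hfp
      obtain ⟨t, ht⟩ := hfp
      have hlt : h.toList < f.toList := by
        rw [← ht, List.append_assoc]
        obtain ⟨c, s', he⟩ := List.exists_cons_of_ne_nil (l := sep.toList ++ t)
          (by simp [hS])
        rw [he]
        exact pv_lex_append_pos _ _ _
      have hle : List.instLE.le f.toList h.toList := (pv_str_le f h).mp (hfg.trans hgh)
      exact hle hlt
    · -- sep occurs in h too: both share the prefix P ++ sep, so g lies between them,
      -- has the same prefix and hence the same first token — contradiction with hmid
      rw [← hPQ] at hhp
      have hgpre : pvFirstPiece f.toList sep.toList ++ sep.toList <+: g.toList :=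
        pv_lex_between _ f.toList g.toList h.toList hfp hhp
          ((pv_str_le f g).mp hfg) ((pv_str_le g h).mp hgh)
      have hno := pvFP_transfer f.toList g.toList _ sep.toList hS rfl hfp hgpre
      have hdet := pvFP_determined (pvFirstPiece f.toList sep.toList) sep.toList hS
        g.toList hgpre hno
      exact hmid (((pvKey_eq g sep hsep).trans (by rw [hdet])).trans hkf.symm)

theorem pv_sorted_sep (fields : List String) (sep : String) (hsep : sep ≠ "") :
    pvSepIdx ((PySem.List.sorted fields (fun x => x)).map (fun f => pvSplit f sep)) := by
  intro i m j hi hm hj him hmj hkey hmid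
  have hp := PySem.List.sorted_pairwise fields (fun x => x)
  rw [List.pairwise_iff_getElem] at hp
  have hi' : i < (PySem.List.sorted fields (fun x => x)).length := by simpa using hi
  have hm' : m < (PySem.List.sorted fields (fun x => x)).length := by simpa using hm
  have hj' : j < (PySem.List.sorted fields (fun x => x)).length := by simpa using hj
  simp only [List.getElem_map] at hkey hmid ⊢
  exact pv_S_main sep _ _ _ hsep (hp i m hi' hm' him) (hp m j hm' hj' hmj) hkey hmid

theorem pvSepIdx_suffix (l₁ l₂ : List (List String)) (h : pvSepIdx (l₁ ++ l₂)) : pvSepIdx l₂ := by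
  intro i m j hi hm hj him hmj hkey hmid
  have e : ∀ (x : Nat) (hx : x < l₂.length), (l₁ ++ l₂)[l₁.length + x]'(by simp; omega) = l₂[x] := by
    intro x hx
    rw [List.getElem_append_right (by omega)]
    congr 1
    omega
  have := h (l₁.length + i) (l₁.length + m) (l₁.length + j)
    (by simp; omega) (by simp; omega) (by simp; omega)
    (by omega) (by omega)
  rw [e i hi, e m hm, e j hj] at this
  exact this hkey hmid

-- ---- the fold equality (groupby pipeline = element-wise setdefault/update) ----
def pvStepT (d : PySem.Dict String (PySem.Set String)) (t : List String) :
    PySem.Dict String (PySem.Set String) :=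
  d.insert (t.headD "") (PySem.Set.update (d.getD (t.headD "") PySem.Set.empty)
    (t.filter (fun x => !(x == t.headD ""))))

theorem pv_group_fold (g : List (List String)) (k : String) :
    ∀ (d : PySem.Dict String (PySem.Set String)) (s : PySem.Set String),
    (∀ t ∈ g, t.headD "" = k) →
    g.foldl pvStepT (d.insert k s) =
      d.insert k (PySem.Set.update s ((g.flatten).filter (fun x => !(x == k)))) := by
  induction g with
  | nil => intro d s _; rfl
  | cons t g' ih =>
    intro d s hk
    have hkt : t.headD "" = k := hk t List.mem_cons_self
    rw [List.foldl_cons]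
    have hstep : pvStepT (d.insert k s) t =
        d.insert k (PySem.Set.update s (t.filter (fun x => !(x == k)))) := by
      rw [pvStepT, hkt, PySem.Dict.getD_insert_self, PySem.Dict.insert_insert_self]
    rw [hstep, ih d _ (fun u hu => hk u (List.mem_cons_of_mem _ hu)),
      List.flatten_cons, List.filter_append, pv_set_update_append]

theorem pv_dropWhile_head_false {α : Type} (p : α → Bool) (l : List α) (r : α) (rt : List α)
    (h : l.dropWhile p = r :: rt) : p r = false := by
  induction l with
  | nil => simp at h
  | cons a l ih =>
    rw [List.dropWhile_cons] at h
    by_cases pa : p a = true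
    · rw [if_pos pa] at h; exact ih h
    · rw [if_neg pa] at h
      cases h
      simpa using pa

theorem pv_main_fold (n : Nat) : ∀ (ts : List (List String)) (d : PySem.Dict String (PySem.Set String)),
    ts.length ≤ n → pvSepIdx ts →
    (∀ t ∈ ts, ∀ s, d.get? (t.headD "") = some s → s = []) →
    ts.foldl pvStepT d = (pvGroups ts).foldl pvStepA d := by
  induction n with
  | zero =>
    intro ts d hlen _ _
    have : ts = [] := List.length_eq_zero_iff.mp (by omega)
    subst this
    simp [pvGroups]
  | succ n ih =>
    intro ts d hlen hsep hinv
    cases ts with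
    | nil => simp [pvGroups]
    | cons t ts' =>
      have hgr : pvGroups (t :: ts') =
          (t.headD "", t :: ts'.takeWhile (fun u => u.headD "" == t.headD "")) ::
            pvGroups (ts'.dropWhile (fun u => u.headD "" == t.headD "")) := by
        rw [pvGroups]
      set g := ts'.takeWhile (fun u => u.headD "" == t.headD "") with hg
      set rest := ts'.dropWhile (fun u => u.headD "" == t.headD "") with hr
      have hsplit : g ++ rest = ts' := List.takeWhile_append_dropWhile
      have hts : t :: ts' = (t :: g) ++ rest := by rw [List.cons_append, hsplit]
      have hgk : ∀ u ∈ t :: g, u.headD "" = t.headD "" := by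
        intro u hu
        rcases List.mem_cons.mp hu with rfl | hu
        · rfl
        · rw [hg] at hu
          have hb := List.mem_takeWhile_imp hu
          simp only [beq_iff_eq] at hb
          exact hb
      have hgetD : d.getD (t.headD "") PySem.Set.empty = PySem.Set.empty := by
        cases hq : d.get? (t.headD "") with
        | none => simp only [PySem.Dict.getD, hq, Option.getD_none]
        | some s =>
          have hse := hinv t List.mem_cons_self s hq
          subst hse
          simp only [PySem.Dict.getD, hq, Option.getD_some]
          rfl
      have hL : (t :: ts').foldl pvStepT d = rest.foldl pvStepT (pvStepA d (t.headD "", t :: g)) := by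
        rw [hts, List.foldl_append, List.foldl_cons]
        congr 1
        have h1 : pvStepT d t = d.insert (t.headD "")
            (PySem.Set.update PySem.Set.empty (t.filter (fun x => !(x == t.headD "")))) := by
          rw [pvStepT, hgetD]
        rw [h1, pv_group_fold g (t.headD "") d _ (fun u hu => hgk u (List.mem_cons_of_mem _ hu)),
          pvStepA, ← pv_set_update_append, ← List.filter_append, ← List.flatten_cons]
        show d.insert _ (PySem.Set.update [] _) = _
        rw [PySem.Set.update_nil_left]
      have hR : (pvGroups (t :: ts')).foldl pvStepA d =
          (pvGroups rest).foldl pvStepA (pvStepA d (t.headD "", t :: g)) := by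
        rw [hgr, List.foldl_cons]
      rw [hL, hR]
      refine ih rest _ ?_ ?_ ?_
      · have h1 : rest.length ≤ ts'.length := (List.dropWhile_sublist _).length_le
        simp only [List.length_cons] at hlen
        omega
      · exact pvSepIdx_suffix (t :: g) rest (hts ▸ hsep)
      · intro u hu s hs
        by_cases hkey : u.headD "" = t.headD ""
        · -- the key reappears after the group: the earlier contribution must be empty
          rw [hkey, pvStepA, PySem.Dict.get?_insert_self] at hs
          cases hrest : rest with
          | nil => rw [hrest] at hu; simp at hu
          | cons r rt =>
            have hrk : ((fun u => u.headD "" == t.headD "") r) = false :=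
              pv_dropWhile_head_false _ ts' r rt (by rw [← hr, hrest])
            have hrne : r.headD "" ≠ t.headD "" := by simpa using hrk
            have hu' : u ∈ rt := by
              rcases List.mem_cons.mp (by rw [hrest] at hu; exact hu) with rfl | h
              · exact absurd hkey hrne
              · exact h
            obtain ⟨j₀, hj₀, hj₀e⟩ := List.mem_iff_getElem.mp hu'
            have hts2 : t :: ts' = (t :: g) ++ r :: rt := by rw [hts, hrest]
            have hsep2 : pvSepIdx ((t :: g) ++ r :: rt) := by rw [← hts2]; exact hsep
            have hc : ((t :: g).flatten).filter (fun x => !(x == t.headD "")) = [] := by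
              rw [List.filter_flatten, List.flatten_eq_nil_iff]
              intro l hl
              rw [List.mem_map] at hl
              obtain ⟨t', ht', rfl⟩ := hl
              obtain ⟨i₀, hi₀, hi₀e⟩ := List.mem_iff_getElem.mp ht'
              have hb1 : i₀ < ((t :: g) ++ r :: rt).length := by
                rw [List.length_append]; omega
              have hb2 : (t :: g).length < ((t :: g) ++ r :: rt).length := by
                simp only [List.length_append, List.length_cons]; omega
              have hb3 : (t :: g).length + 1 + j₀ < ((t :: g) ++ r :: rt).length := by
                simp only [List.length_append, List.length_cons]; omega
              have e1 : ((t :: g) ++ r :: rt)[i₀]'hb1 = t' := by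
                rw [List.getElem_append_left hi₀]
                exact hi₀e
              have e2 : ((t :: g) ++ r :: rt)[(t :: g).length]'hb2 = r := by
                rw [List.getElem_append_right (le_refl _)]
                simp
              have e3 : ((t :: g) ++ r :: rt)[(t :: g).length + 1 + j₀]'hb3 = u := by
                rw [List.getElem_append_right (by omega)]
                have he : (t :: g).length + 1 + j₀ - (t :: g).length = j₀ + 1 := by omega
                simp only [he, List.getElem_cons_succ]
                exact hj₀e
              have hconc := hsep2 i₀ (t :: g).length ((t :: g).length + 1 + j₀) hb1 hb2 hb3
                hi₀ (by omega)
              rw [e1, e2, e3] at hconc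
              have hkt' : t'.headD "" = t.headD "" := hgk t' ht'
              have hres := hconc (by rw [hkt', hkey]) (by rw [hkt']; exact hrne)
              rw [hkt'] at hres
              exact hres
            rw [hc] at hs
            exact (Option.some_inj.mp hs).symm
        · rw [pvStepA, PySem.Dict.get?_insert_of_ne d _ hkey] at hs
          refine hinv u ?_ s hs
          rw [hts]
          exact List.mem_append_right _ hu

-- ---- items of the element-wise fold: first-occurrence keys, concatenated contributions ----
def pvContrib (k : String) (ts : List (List String)) : List String :=
  (ts.filter (fun t => t.headD "" == k)).flatMap (fun t => t.filter (fun x => !(x == k)))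

def pvNewKeys (seen : List String) : List (List String) → List String
  | [] => []
  | t :: ts =>
    if seen.contains (t.headD "") then pvNewKeys seen ts
    else (t.headD "") :: pvNewKeys ((t.headD "") :: seen) ts

theorem pvContrib_cons (k : String) (t : List String) (ts : List (List String)) :
    pvContrib k (t :: ts) =
      if t.headD "" = k then t.filter (fun x => !(x == k)) ++ pvContrib k ts
      else pvContrib k ts := by
  by_cases h : t.headD "" = k
  · rw [if_pos h, pvContrib, List.filter_cons, if_pos (by rw [beq_iff_eq]; exact h),
      List.flatMap_cons]
    rfl
  · rw [if_neg h, pvContrib, List.filter_cons, if_neg (by rw [beq_iff_eq]; exact h)]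
    rfl

theorem pvNewKeys_congr (s₁ s₂ : List String) (h : ∀ x, x ∈ s₁ ↔ x ∈ s₂) :
    ∀ ts, pvNewKeys s₁ ts = pvNewKeys s₂ ts := by
  intro ts
  induction ts generalizing s₁ s₂ with
  | nil => rfl
  | cons t ts ih =>
    have hc : s₁.contains (t.headD "") = s₂.contains (t.headD "") := by
      rw [Bool.eq_iff_iff, List.contains_iff_mem, List.contains_iff_mem]; exact h _
    rw [pvNewKeys, pvNewKeys, hc]
    by_cases hm : s₂.contains (t.headD "") = true
    · rw [if_pos hm, if_pos hm]; exact ih s₁ s₂ h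
    · rw [if_neg hm, if_neg hm]
      exact congrArg _ (ih _ _ (by intro x; simp [h x]))

theorem pvNewKeys_not_mem : ∀ (ts : List (List String)) (seen : List String) (k : String),
    k ∈ pvNewKeys seen ts → k ∉ seen := by
  intro ts
  induction ts with
  | nil => intro seen k h; cases h
  | cons t ts ih =>
    intro seen k h
    rw [pvNewKeys] at h
    by_cases hm : seen.contains (t.headD "") = true
    · rw [if_pos hm] at h; exact ih seen k h
    · rw [if_neg hm] at h
      rcases List.mem_cons.mp h with rfl | h'
      · intro hk
        rw [List.contains_iff_mem] at hm
        exact hm hk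
      · intro hk
        exact ih _ k h' (List.mem_cons_of_mem _ hk)

theorem pv_dict_contains (acc : List (String × PySem.Set String)) (k : String) :
    (PySem.Dict.mk acc).contains k = (acc.map Prod.fst).contains k := by
  rw [Bool.eq_iff_iff]
  simp [PySem.Dict.contains, List.any_eq_true, List.mem_map]

theorem pv_get?_mem : ∀ (acc : List (String × PySem.Set String)),
    (acc.map Prod.fst).Nodup → ∀ p ∈ acc, (PySem.Dict.mk acc).get? p.1 = some p.2 := by
  intro acc
  induction acc with
  | nil => intro _ p hp; cases hp
  | cons a acc ih =>
    intro hnd p hp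
    rcases List.mem_cons.mp hp with rfl | hp'
    · simp [PySem.Dict.get?, List.find?]
    · have h1 : p.1 ∈ acc.map Prod.fst := List.mem_map_of_mem hp'
      have h2 : a.1 ∉ acc.map Prod.fst := (List.nodup_cons.mp (by simpa using hnd)).1
      have hne : (a.1 == p.1) = false := by
        rw [beq_eq_false_iff_ne]
        intro h
        exact h2 (h ▸ h1)
      have := ih (List.nodup_cons.mp (by simpa using hnd)).2 p hp'
      simpa [PySem.Dict.get?, List.find?, hne] using this

theorem pv_get?_not_mem (acc : List (String × PySem.Set String)) (k : String)
    (h : (acc.map Prod.fst).contains k = false) : (PySem.Dict.mk acc).get? k = none := by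
  rw [PySem.Dict.get?, Option.map_eq_none_iff, List.find?_eq_none]
  intro p hp hbeq
  rw [← Bool.not_eq_true, List.contains_iff_mem] at h
  exact h (eq_of_beq hbeq ▸ List.mem_map_of_mem hp)

theorem pv_ofList_append (a b : List String) :
    PySem.Set.ofList (a ++ b) = PySem.Set.update (PySem.Set.ofList a) b := by
  simp [PySem.Set.ofList, PySem.Set.update, List.foldl_append]

theorem pv_set_update_append2 (s : PySem.Set String) (a b : List String) :
    PySem.Set.update (PySem.Set.update s a) b = PySem.Set.update s (a ++ b) := by
  simp [PySem.Set.update, List.foldl_append]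

theorem pv_fold_items : ∀ (ts : List (List String)) (acc : List (String × PySem.Set String)),
    (acc.map Prod.fst).Nodup →
    (ts.foldl pvStepT (PySem.Dict.mk acc)).items =
      acc.map (fun kv => (kv.1, PySem.Set.update kv.2 (pvContrib kv.1 ts))) ++
      (pvNewKeys (acc.map Prod.fst) ts).map
        (fun k => (k, PySem.Set.ofList (pvContrib k ts))) := by
  intro ts
  induction ts with
  | nil =>
    intro acc _
    simp [pvNewKeys, pvContrib, PySem.Set.update]
  | cons t ts ih =>
    intro acc hnd
    rw [List.foldl_cons]
    by_cases hm : (acc.map Prod.fst).contains (t.headD "") = true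
    · -- key already present: in-place replacement
      have hc : (PySem.Dict.mk acc).contains (t.headD "") = true := by
        rw [pv_dict_contains]; exact hm
      have hstep : pvStepT (PySem.Dict.mk acc) t = PySem.Dict.mk (acc.map (fun p =>
          if p.1 == t.headD "" then (t.headD "",
            PySem.Set.update ((PySem.Dict.mk acc).getD (t.headD "") PySem.Set.empty)
              (t.filter (fun x => !(x == t.headD "")))) else p)) := by
        rw [pvStepT, PySem.Dict.insert, if_pos hc]
      rw [hstep]
      have hkeys : ((acc.map (fun p =>
          if p.1 == t.headD "" then (t.headD "",
            PySem.Set.update ((PySem.Dict.mk acc).getD (t.headD "") PySem.Set.empty)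
              (t.filter (fun x => !(x == t.headD "")))) else p)).map Prod.fst)
          = acc.map Prod.fst := by
        rw [List.map_map]
        apply List.map_congr_left
        intro p _
        simp only [Function.comp_apply]
        by_cases hpk : (p.1 == t.headD "") = true
        · rw [if_pos hpk]
          exact (eq_of_beq hpk).symm
        · rw [if_neg hpk]
      rw [ih _ (by rw [hkeys]; exact hnd), hkeys, List.map_map]
      congr 1
      · apply List.map_congr_left
        intro p hp
        simp only [Function.comp_apply]
        by_cases hpk : (p.1 == t.headD "") = true
        · have hk : t.headD "" = p.1 := (eq_of_beq hpk).symm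
          have hget : (PySem.Dict.mk acc).getD (t.headD "") PySem.Set.empty = p.2 := by
            rw [hk, PySem.Dict.getD, pv_get?_mem acc hnd p hp]
            rfl
          rw [if_pos hpk, hget]
          show (t.headD "", PySem.Set.update (PySem.Set.update p.2
            (t.filter (fun x => !(x == t.headD "")))) (pvContrib (t.headD "") ts)) = _
          rw [pv_set_update_append2, pvContrib_cons, if_pos hk, hk]
        · rw [if_neg hpk]
          show (p.1, PySem.Set.update p.2 (pvContrib p.1 ts)) = _
          rw [pvContrib_cons, if_neg (fun h => hpk (by rw [beq_iff_eq]; exact h.symm))]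
      · rw [pvNewKeys, if_pos hm]
        apply List.map_congr_left
        intro k hk
        have hne : k ∉ acc.map Prod.fst := pvNewKeys_not_mem ts _ k hk
        have hkk : ¬ (t.headD "" = k) := by
          rintro rfl
          exact hne (List.contains_iff_mem.mp hm)
        rw [pvContrib_cons, if_neg hkk]
    · -- new key: appended
      have hc : (PySem.Dict.mk acc).contains (t.headD "") = false := by
        rw [pv_dict_contains]; simpa using hm
      have hmf : (acc.map Prod.fst).contains (t.headD "") = false := by
        rw [← Bool.not_eq_true]; exact hm
      have hget : (PySem.Dict.mk acc).getD (t.headD "") PySem.Set.empty = PySem.Set.empty := by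
        rw [PySem.Dict.getD, pv_get?_not_mem acc _ hmf]
        rfl
      have hstep : pvStepT (PySem.Dict.mk acc) t = PySem.Dict.mk (acc ++
          [(t.headD "", PySem.Set.ofList (t.filter (fun x => !(x == t.headD ""))))]) := by
        rw [pvStepT, PySem.Dict.insert, if_neg (by rw [hc]; exact Bool.false_ne_true), hget]
        rfl
      rw [hstep]
      have hknotin : t.headD "" ∉ acc.map Prod.fst := by
        intro hmem
        exact hm (List.contains_iff_mem.mpr hmem)
      have hnd' : (((acc ++ [(t.headD "", PySem.Set.ofList (t.filter (fun x => !(x == t.headD ""))))]).map Prod.fst)).Nodup := by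
        rw [List.map_append, List.nodup_append]
        refine ⟨hnd, by simp, ?_⟩
        intro a ha b hbmem
        have hbe : b = t.headD "" := by simpa using hbmem
        intro h
        rw [h, hbe] at ha
        exact hknotin ha
      rw [ih _ hnd', List.map_append, List.map_append]
      simp only [List.map_cons, List.map_nil]
      rw [pvNewKeys, if_neg hm]
      rw [pvNewKeys_congr (acc.map Prod.fst ++ [t.headD ""]) (t.headD "" :: acc.map Prod.fst)
        (by intro x; simp [or_comm]) ts]
      rw [List.map_cons, List.append_assoc]
      congr 1
      · apply List.map_congr_left
        rintro ⟨p1, p2⟩ hp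
        have hne : ¬ (t.headD "" = p1) := by
          intro h
          exact hknotin (h ▸ List.mem_map_of_mem hp)
        rw [pvContrib_cons, if_neg hne]
      · rw [List.singleton_append]
        congr 1
        · rw [pvContrib_cons, if_pos rfl, pv_ofList_append]
        · apply List.map_congr_left
          intro k hk
          have hne : k ∉ t.headD "" :: acc.map Prod.fst := pvNewKeys_not_mem ts _ k hk
          have hkk : ¬ (t.headD "" = k) := by
            rintro rfl
            exact hne List.mem_cons_self
          rw [pvContrib_cons, if_neg hkk]

-- ---- bridges from B's scans to pvNewKeys / pvContrib ----
theorem pv_prefixes_fold (sep : String) : ∀ (fs : List String) (acc : List String),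
    fs.foldl (pvStepP sep) acc = acc ++ pvNewKeys acc (fs.map (fun f => pvSplit f sep)) := by
  intro fs
  induction fs with
  | nil => intro acc; simp [pvNewKeys]
  | cons f fs ih =>
    intro acc
    rw [List.foldl_cons, List.map_cons, pvNewKeys]
    by_cases hm : acc.contains ((pvSplit f sep).headD "") = true
    · rw [pvStepP]
      simp only [hm, if_pos]
      rw [ih acc]
    · rw [pvStepP]
      simp only [hm, Bool.false_eq_true, if_neg, not_false_iff]
      rw [ih (acc ++ [(pvSplit f sep).headD ""]),
        pvNewKeys_congr (acc ++ [(pvSplit f sep).headD ""])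
          ((pvSplit f sep).headD "" :: acc) (by intro x; simp [or_comm]) (fs.map _),
        List.append_assoc, List.singleton_append]

theorem pv_contrib_map (sep p : String) (fs : List String) :
    (fs.filter (fun f => (pvSplit f sep).headD "" == p)).flatMap
        (fun f => (pvSplit f sep).filter (fun t => !(t == p)))
      = pvContrib p (fs.map (fun f => pvSplit f sep)) := by
  rw [pvContrib, List.filter_map, List.flatMap_map]
  rfl

-- ===== VERDICT (by name: the statement is the Claim_ definition above) =====
theorem get_fields_to_nest_spec : Claim_equal_get_fields_to_nest := by
  intro fields force_fields sep _hdom hpre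
  rcases hpre with hsep | rfl
  case inr =>
    unfold Spec_get_fields_to_nest get_fields_to_nest get_fields_to_nest_alt
    have hs : PySem.List.sorted ([] : List String) (fun x => x) = [] := rfl
    rw [hs]
    simp [pvGroups, PySem.Dict.empty]
  unfold Spec_get_fields_to_nest
  simp only [get_fields_to_nest, get_fields_to_nest_alt]
  -- A's dict is the element-wise fold, whose items are the first-occurrence prefixes with
  -- their concatenated contributions
  have hitems : ((pvGroups ((PySem.List.sorted fields (fun x => x)).map
      (fun x => pvSplit x sep))).foldl pvStepA PySem.Dict.empty).items =
      (pvNewKeys [] ((PySem.List.sorted fields (fun x => x)).map (fun x => pvSplit x sep))).map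
        (fun k => (k, PySem.Set.ofList (pvContrib k
          ((PySem.List.sorted fields (fun x => x)).map (fun x => pvSplit x sep))))) := by
    rw [← pv_main_fold ((PySem.List.sorted fields (fun x => x)).map
        (fun x => pvSplit x sep)).length _ _ le_rfl (pv_sorted_sep fields sep hsep)
      (by intro t _ u hu; rw [PySem.Dict.get?_empty] at hu; cases hu)]
    exact pv_fold_items _ [] List.nodup_nil
  rw [hitems]
  -- B's prefix list is the same first-occurrence key list
  rw [pv_prefixes_fold sep (PySem.List.sorted fields (fun x => x)) [], List.nil_append]
  -- A's filter-of-items pipeline as a filterMap over the same key list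
  rw [List.filter_map, List.map_map, pv_filterMap_eq]
  -- the two filterMap bodies agree on every key
  have hbody : ∀ P : List String, P.filterMap ((fun x =>
        if ((fun kv => decide (1 < PySem.Set.len kv.2) || force_fields.contains kv.1) ∘
            (fun k => (k, PySem.Set.ofList (pvContrib k
              ((PySem.List.sorted fields (fun x => x)).map (fun x => pvSplit x sep)))))) x
        then some (((fun kv => (kv.1, PySem.Set.ofList (kv.2.map
            (fun sub => (sub, PySem.Str.join sep [kv.1, sub]))))) ∘
            (fun k => (k, PySem.Set.ofList (pvContrib k
              ((PySem.List.sorted fields (fun x => x)).map (fun x => pvSplit x sep)))))) x)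
        else none)) =
      P.filterMap (fun p =>
        if decide (1 < (PySem.Set.ofList
            (((PySem.List.sorted fields (fun x => x)).filter
              (fun f => (pvSplit f sep).headD "" == p)).flatMap
                (fun f => (pvSplit f sep).filter (fun t => !(t == p))))).length) ||
            force_fields.contains p
        then some (p, PySem.Set.ofList ((PySem.Set.ofList
            (((PySem.List.sorted fields (fun x => x)).filter
              (fun f => (pvSplit f sep).headD "" == p)).flatMap
                (fun f => (pvSplit f sep).filter (fun t => !(t == p))))).map
            (fun s => (s, p ++ sep ++ s))))
        else none) := by
    intro P
    apply List.filterMap_congr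
    intro k _
    simp only [Function.comp_apply]
    rw [pv_contrib_map sep k (PySem.List.sorted fields (fun x => x))]
    have hlen : decide (1 < PySem.Set.len (PySem.Set.ofList (pvContrib k
        ((PySem.List.sorted fields (fun x => x)).map (fun x => pvSplit x sep))))) =
        decide (1 < (PySem.Set.ofList (pvContrib k
        ((PySem.List.sorted fields (fun x => x)).map (fun x => pvSplit x sep)))).length) := by
      simp [PySem.Set.len]
    rw [hlen]
    have hmap : (PySem.Set.ofList (pvContrib k
        ((PySem.List.sorted fields (fun x => x)).map (fun x => pvSplit x sep)))).map
          (fun sub => (sub, PySem.Str.join sep [k, sub])) =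
        (PySem.Set.ofList (pvContrib k
        ((PySem.List.sorted fields (fun x => x)).map (fun x => pvSplit x sep)))).map
          (fun s => (s, k ++ sep ++ s)) := by
      apply List.map_congr_left
      intro sub _
      rw [pv_join2]
    rw [hmap]
  rw [hbody]
  -- finally, A's linear membership scan = B's precomputed set membership
  have hnn : ∀ (nested : List (String × List (String × String))),
      fields.filter (fun x => !((nested.map Prod.fst).contains ((pvSplit x sep).headD ""))) =
      fields.filter (fun f =>
        !((PySem.Set.ofList (nested.map Prod.fst)).contains ((pvSplit f sep).headD ""))) := by
    intro nested
    apply List.filter_congr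
    intro x _
    rw [pv_contains_ofList]
  rw [hnn]
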